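-- pv_equiv track=rewrite | github.com/Switzerland-MQP/machine-learning-classifier | label_parser.py | get_index_of_nth_line
-- ===== SOURCE A (Python) =====
-- def get_index_of_nth_line(string, n):
-- 	n -= 1
-- 	i = 0
-- 	counter = 0
-- 	while n > 0:
-- 		if string[counter] == '\n':
-- 			n -= 1
-- 			counter += 1
-- 			continue
-- 		i += 1
-- 		counter += 1
-- 	return i
-- ===== SOURCE B (Python) =====
-- def get_index_of_nth_line(string, n):
--     if n <= 1:
--         return 0
--     newline_positions = [i for i, c in enumerate(string) if c == '\n']
--     return newline_positions[n - 2] - (n - 2)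
-- ===== Notes on version B (the rewrite author's own statement) =====
-- stated objective: alternative
-- what changed: Replaces A's stateful char-by-char countdown loop with collecting the newline positions once (enumerate + comprehension) and reading the (n-1)th one, returning position - (n-2) by arithmetic; raises only via the natural list indexing.
import Mathlib
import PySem

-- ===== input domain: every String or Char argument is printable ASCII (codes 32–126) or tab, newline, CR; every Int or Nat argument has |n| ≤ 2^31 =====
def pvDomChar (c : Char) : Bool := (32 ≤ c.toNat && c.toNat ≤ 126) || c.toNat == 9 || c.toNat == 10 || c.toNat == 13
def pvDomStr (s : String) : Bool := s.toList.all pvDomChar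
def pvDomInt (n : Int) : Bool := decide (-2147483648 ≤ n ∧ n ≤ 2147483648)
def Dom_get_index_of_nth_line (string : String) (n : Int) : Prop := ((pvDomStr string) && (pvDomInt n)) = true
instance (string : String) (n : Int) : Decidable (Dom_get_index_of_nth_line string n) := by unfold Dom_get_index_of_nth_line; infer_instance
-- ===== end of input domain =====

-- B replaces A's char-by-char countdown loop by "collect newline positions, then index + arithmetic"; equal wherever A returns.

-- ===== PORT A =====
-- the while loop of A: state (remaining newline budget m, non-newline count i), advancing one char at a time
def pvLoopA (cs : List Char) (m i : Int) : Int :=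
  if m ≤ 0 then i
  else
    match cs with
    | [] => i          -- Python raises IndexError here (outside Pre_)
    | c :: rest => if c = '\n' then pvLoopA rest (m - 1) i else pvLoopA rest m (i + 1)

def get_index_of_nth_line (string : String) (n : Int) : Int :=
  pvLoopA string.toList (n - 1) 0

-- ===== PORT B =====
def get_index_of_nth_line_alt (string : String) (n : Int) : Int :=
  if n ≤ 1 then 0
  else
    let newline_positions :=
      (PySem.List.enumerate string.toList).filterMap
        (fun p => if p.2 = '\n' then some p.1 else none)
    PySem.List.pyGetD newline_positions (n - 2) 0 - (n - 2)

-- ===== PRECONDITION & SPEC =====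
-- A raises IndexError (and B IndexError) exactly when the string has fewer than n-1 newlines.
def Pre_get_index_of_nth_line (string : String) (n : Int) : Prop :=
  n - 1 ≤ (string.toList.count '\n' : Int)
instance (string : String) (n : Int) : Decidable (Pre_get_index_of_nth_line string n) := by
  unfold Pre_get_index_of_nth_line; infer_instance

def pvWitness_get_index_of_nth_line : String × Int := ("a\nbc\nd", 3)

def Spec_get_index_of_nth_line (string : String) (n : Int) (out : Int) : Prop := out = get_index_of_nth_line_alt string n
instance (string : String) (n : Int) (out : Int) : Decidable (Spec_get_index_of_nth_line string n out) := by unfold Spec_get_index_of_nth_line; infer_instance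

-- ===== CLAIM (what is proved, stated in full; the proofs are below) =====
def Claim_equal_get_index_of_nth_line : Prop := ∀ (string : String) (n : Int), Dom_get_index_of_nth_line string n → Pre_get_index_of_nth_line string n → Spec_get_index_of_nth_line string n (get_index_of_nth_line string n)

-- ===== LEMMAS AND PROOFS =====

-- the newline-position list of cs, enumerated starting at s
def pvPos (cs : List Char) (s : Int) : List Int :=
  (PySem.List.enumerate cs s).filterMap (fun p => if p.2 = '\n' then some p.1 else none)

lemma pvPos_cons (c : Char) (rest : List Char) (s : Int) :
    pvPos (c :: rest) s =
      if c = '\n' then s :: pvPos rest (s + 1) else pvPos rest (s + 1) := by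
  simp only [pvPos, PySem.List.enumerate_cons, List.filterMap_cons]
  split_ifs <;> simp_all

lemma pyGetD_cons_pos {α : Type} (x : α) (xs : List α) (j : Int) (d : α) (hj : 1 ≤ j) :
    PySem.List.pyGetD (x :: xs) j d = PySem.List.pyGetD xs (j - 1) d := by
  unfold PySem.List.pyGetD PySem.List.pyGet? PySem.List.pyIdx?
  have h0 : (0:Int) ≤ j := by omega
  have h0' : (0:Int) ≤ j - 1 := by omega
  simp only [if_pos h0, if_pos h0']
  by_cases hlt : j < ((x :: xs).length : Int)
  · have hlt' : j - 1 < (xs.length : Int) := by simp at hlt ⊢; omega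
    rw [if_pos hlt, if_pos hlt']
    show ((x :: xs)[j.toNat]?).getD d = (xs[(j - 1).toNat]?).getD d
    have hn : j.toNat = (j - 1).toNat + 1 := by omega
    rw [hn, List.getElem?_cons_succ]
  · have hlt' : ¬ (j - 1 < (xs.length : Int)) := by simp at hlt ⊢; omega
    rw [if_neg hlt, if_neg hlt']
    rfl

lemma pyGetD_cons_zero {α : Type} (x : α) (xs : List α) (d : α) :
    PySem.List.pyGetD (x :: xs) 0 d = x := by
  simp [PySem.List.pyGetD, PySem.List.pyGet?, PySem.List.pyIdx?]

-- A's loop, when it completes normally, reads off the (m-1)th newline position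
lemma pvLoopA_eq (cs : List Char) : ∀ (s m i : Int), 1 ≤ m →
    m ≤ (cs.count '\n' : Int) →
    pvLoopA cs m i = i + (PySem.List.pyGetD (pvPos cs s) (m - 1) 0 - s) - (m - 1) := by
  induction cs with
  | nil => intro s m i hm hc; simp at hc; omega
  | cons c rest ih =>
    intro s m i hm hc
    rw [pvLoopA.eq_def, pvPos_cons]
    by_cases hcnl : c = '\n'
    · simp only [hcnl, if_true]
      have hcount : (List.count '\n' (c :: rest) : Int) = (rest.count '\n' : Int) + 1 := by
        simp [hcnl]
      by_cases hm1 : m = 1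
      · subst hm1
        rw [if_neg (by omega), pvLoopA.eq_def, if_pos (by omega)]
        norm_num [pyGetD_cons_zero]
      · have h2 : 2 ≤ m := by omega
        rw [if_neg (by omega), ih (s + 1) (m - 1) i (by omega) (by omega),
            pyGetD_cons_pos _ _ _ _ (by omega)]
        ring_nf
      
    · simp only [if_neg hcnl]
      have hcount : (List.count '\n' (c :: rest) : Int) = (rest.count '\n' : Int) := by
        simp [hcnl]
      rw [if_neg (by omega), ih (s + 1) m (i + 1) hm (by omega)]
      ring_nf

-- ===== VERDICT (by name: the statement is the Claim_ definition above) =====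
theorem get_index_of_nth_line_spec : Claim_equal_get_index_of_nth_line := by
  intro string n _ hpre
  unfold Spec_get_index_of_nth_line get_index_of_nth_line get_index_of_nth_line_alt
  by_cases hn : n ≤ 1
  · rw [if_pos hn, pvLoopA.eq_def, if_pos (by omega)]
  · rw [if_neg hn]
    have := pvLoopA_eq string.toList 0 (n - 1) 0 (by omega) hpre
    simp only [pvPos] at this
    rw [this]
    ring_nf
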